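-- pv_equiv track=rewrite | github.com/alperduzgun/warden-core | src/warden/validation/frames/security/_internal/supply_chain_check.py | _is_common_prefix_suffix_swap
-- ===== SOURCE A (Python) =====
-- def _is_common_prefix_suffix_swap(dep_name: str, popular_name: str) -> bool:
--     """
--     Check for common typosquatting patterns beyond edit distance:
--     - python-<name> vs <name>
--     - <name>-python vs <name>
--     - <name>2 vs <name>
--     - <name>-js vs <name>
--
--     Args:
--         dep_name: The dependency package name (normalized).
--         popular_name: The popular package name (normalized).
--
--     Returns:
--         True if the dependency looks like a prefix/suffix variant of the popular package.
--     """
--     prefixes = ["python-", "py-", "node-", "js-"]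
--     suffixes = ["-python", "-py", "-node", "-js", "-dev", "2", "3"]
--
--     for prefix in prefixes:
--         if dep_name == prefix + popular_name:
--             return True
--         if popular_name == prefix + dep_name:
--             return True
--
--     for suffix in suffixes:
--         if dep_name == popular_name + suffix:
--             return True
--         if popular_name == dep_name + suffix:
--             return True
--
--     return False
-- ===== SOURCE B (Python) =====
-- _PREFIXES = {"python-", "py-", "node-", "js-"}
-- _SUFFIXES = {"-python", "-py", "-node", "-js", "-dev", "2", "3"}
--
--
-- def _is_common_prefix_suffix_swap(dep_name: str, popular_name: str) -> bool:
--     # Every decoration changes the length, so the length difference pins down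
--     # the single candidate affix; extract it and look it up in a set.
--     k = len(dep_name) - len(popular_name)
--     if k == 0:
--         return False
--     long, short = (dep_name, popular_name) if k > 0 else (popular_name, dep_name)
--     n = abs(k)
--     return (long[:n] in _PREFIXES and long[n:] == short) or \
--            (long[-n:] in _SUFFIXES and long[:-n] == short)
-- ===== Notes on version B (the rewrite author's own statement) =====
-- stated objective: simpler
-- what changed: Instead of trying all 11 affix decorations against both names, B computes the signed length difference once (equal length is immediately False), slices the single candidate prefix and suffix of that length off the longer name, and decides by two set-membership lookups plus one remainder comparison each.
import Mathlib
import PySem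

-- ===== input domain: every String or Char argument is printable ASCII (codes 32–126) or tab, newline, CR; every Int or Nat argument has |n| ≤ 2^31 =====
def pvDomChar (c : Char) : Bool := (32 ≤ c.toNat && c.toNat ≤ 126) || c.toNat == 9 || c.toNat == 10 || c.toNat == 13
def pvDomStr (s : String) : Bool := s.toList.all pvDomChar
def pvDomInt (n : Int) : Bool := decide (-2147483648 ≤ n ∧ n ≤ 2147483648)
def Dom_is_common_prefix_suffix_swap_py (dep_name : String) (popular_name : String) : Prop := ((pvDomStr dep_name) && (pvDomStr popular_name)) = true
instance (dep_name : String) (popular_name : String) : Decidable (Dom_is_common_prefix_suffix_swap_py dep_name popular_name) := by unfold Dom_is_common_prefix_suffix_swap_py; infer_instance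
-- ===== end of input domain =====

-- B computes the signed length difference once (equal length is False), slices the single
-- candidate prefix/suffix of that length off the longer name and decides by set lookup,
-- instead of testing all 11 decorations against both names (simpler).

-- ===== PORT A =====
def pvPrefixesA : List (List Char) :=
  ["python-".toList, "py-".toList, "node-".toList, "js-".toList]
def pvSuffixesA : List (List Char) :=
  ["-python".toList, "-py".toList, "-node".toList, "-js".toList, "-dev".toList, "2".toList, "3".toList]

-- literal port of A: try every prefix against both names, then every suffix (early-return loop = List.any)
def is_common_prefix_suffix_swap_py (dep_name : String) (popular_name : String) : Bool :=
  let d := dep_name.toList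
  let p := popular_name.toList
  if pvPrefixesA.any (fun pre => d == pre ++ p || p == pre ++ d) then true
  else if pvSuffixesA.any (fun suf => d == p ++ suf || p == d ++ suf) then true
  else false

-- ===== PORT B =====
def pvPreSetB : List (List Char) :=
  [['p','y','t','h','o','n','-'], ['p','y','-'], ['n','o','d','e','-'], ['j','s','-']]
def pvSufSetB : List (List Char) :=
  [['-','p','y','t','h','o','n'], ['-','p','y'], ['-','n','o','d','e'], ['-','j','s'], ['-','d','e','v'], ['2'], ['3']]

-- literal port of B: n = abs(len diff) ≥ 1 here, so the slices long[:n], long[n:],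
-- long[-n:], long[:-n] are exactly List.take n / drop n / drop (len-n) / take (len-n).
def is_common_prefix_suffix_swap_py_alt (dep_name : String) (popular_name : String) : Bool :=
  let d := dep_name.toList
  let p := popular_name.toList
  let k : Int := (d.length : Int) - (p.length : Int)
  if k == 0 then false
  else
    let lng := if k > 0 then d else p
    let srt := if k > 0 then p else d
    let n := k.natAbs
    (pvPreSetB.contains (lng.take n) && lng.drop n == srt) ||
    (pvSufSetB.contains (lng.drop (lng.length - n)) && lng.take (lng.length - n) == srt)

-- ===== PRECONDITION & SPEC =====
def Spec_is_common_prefix_suffix_swap_py (dep_name : String) (popular_name : String) (out : Bool) : Prop := out = is_common_prefix_suffix_swap_py_alt dep_name popular_name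
instance (dep_name : String) (popular_name : String) (out : Bool) : Decidable (Spec_is_common_prefix_suffix_swap_py dep_name popular_name out) := by unfold Spec_is_common_prefix_suffix_swap_py; infer_instance

-- ===== CLAIM (what is proved, stated in full; the proofs are below) =====
def Claim_equal_is_common_prefix_suffix_swap_py : Prop := ∀ (dep_name : String) (popular_name : String), Dom_is_common_prefix_suffix_swap_py dep_name popular_name → Spec_is_common_prefix_suffix_swap_py dep_name popular_name (is_common_prefix_suffix_swap_py dep_name popular_name)

-- ===== LEMMAS AND PROOFS =====

-- with n = |lng| - |srt|: lng is some q∈S followed by srt  iff  B's take/drop test fires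
lemma pv_suffix_iff (S : List (List Char)) (lng srt : List Char) (h : srt.length ≤ lng.length) :
    ((∃ q ∈ S, lng = q ++ srt) ↔
      (S.contains (lng.take (lng.length - srt.length)) ∧
        lng.drop (lng.length - srt.length) = srt)) := by
  constructor
  · rintro ⟨q, hq, rfl⟩
    have hl : (q ++ srt).length - srt.length = q.length := by simp
    rw [hl, List.take_left, List.drop_left]
    exact ⟨List.contains_iff_mem.2 hq, rfl⟩
  · rintro ⟨hmem, hdrop⟩
    exact ⟨_, List.contains_iff_mem.1 hmem, by
      conv_lhs => rw [← List.take_append_drop (lng.length - srt.length) lng]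
      rw [hdrop]⟩

-- with m = |srt|: lng is srt followed by some q∈S  iff  B's drop/take test fires
lemma pv_prefix_iff (S : List (List Char)) (lng srt : List Char) :
    ((∃ q ∈ S, lng = srt ++ q) ↔
      (S.contains (lng.drop srt.length) ∧ lng.take srt.length = srt)) := by
  constructor
  · rintro ⟨q, hq, rfl⟩
    rw [List.drop_left, List.take_left]
    exact ⟨List.contains_iff_mem.2 hq, rfl⟩
  · rintro ⟨hmem, htake⟩
    exact ⟨_, List.contains_iff_mem.1 hmem, by
      conv_lhs => rw [← List.take_append_drop srt.length lng]
      rw [htake]⟩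

-- the core equivalence on character lists
lemma pv_core (d p : List Char) :
    (if pvPrefixesA.any (fun pre => d == pre ++ p || p == pre ++ d) then true
     else if pvSuffixesA.any (fun suf => d == p ++ suf || p == d ++ suf) then true
     else false)
    = (let k : Int := (d.length : Int) - (p.length : Int)
       if k == 0 then false
       else
         let lng := if k > 0 then d else p
         let srt := if k > 0 then p else d
         let n := k.natAbs
         (pvPreSetB.contains (lng.take n) && lng.drop n == srt) ||
         (pvSufSetB.contains (lng.drop (lng.length - n)) && lng.take (lng.length - n) == srt)) := by
  have hPne : ∀ q ∈ pvPrefixesA, 0 < q.length := by decide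
  have hSne : ∀ q ∈ pvSuffixesA, 0 < q.length := by decide
  have hPS : pvPreSetB = pvPrefixesA := by decide
  have hSS : pvSufSetB = pvSuffixesA := by decide
  simp only [hPS, hSS]
  rcases Nat.lt_trichotomy d.length p.length with hlt | heq | hgt
  · -- p is the longer name: k < 0, lng = p, srt = d, n = p.length - d.length
    have hk0 : (((d.length : Int) - (p.length : Int)) == 0) = false := by simp; omega
    have hkpos : ¬ ((d.length : Int) - (p.length : Int) > 0) := by omega
    have hn : ((d.length : Int) - (p.length : Int)).natAbs = p.length - d.length := by omega
    simp only [hk0, Bool.false_eq_true, if_false, if_neg hkpos, hn]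
    simp only [Bool.if_true_left, Bool.decide_eq_true, Bool.or_false]
    rw [Bool.eq_iff_iff]
    simp only [Bool.or_eq_true, Bool.and_eq_true, List.any_eq_true, beq_iff_eq]
    have hmm : p.length - (p.length - d.length) = d.length := by omega
    rw [hmm]
    constructor
    · rintro (⟨q, hq, hbad | hq2⟩ | ⟨q, hq, hbad | hq2⟩)
      · exfalso; have := congrArg List.length hbad; have := hPne q hq
        simp [List.length_append] at *; omega
      · exact Or.inl (by
          have := (pv_suffix_iff pvPrefixesA p d (by omega)).1 ⟨q, hq, hq2⟩
          exact ⟨this.1, by simp [this.2]⟩)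
      · exfalso; have := congrArg List.length hbad; have := hSne q hq
        simp [List.length_append] at *; omega
      · exact Or.inr (by
          have := (pv_prefix_iff pvSuffixesA p d).1 ⟨q, hq, hq2⟩
          exact ⟨this.1, by simp [this.2]⟩)
    · rintro (⟨hmem, hdrop⟩ | ⟨hmem, htake⟩)
      · obtain ⟨q, hq, heq⟩ := (pv_suffix_iff pvPrefixesA p d (by omega)).2
          ⟨hmem, by simpa using hdrop⟩
        exact Or.inl ⟨q, hq, Or.inr heq⟩
      · obtain ⟨q, hq, hExp⟩ := (pv_prefix_iff pvSuffixesA p d).2 ⟨hmem, by simpa using htake⟩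
        exact Or.inr ⟨q, hq, Or.inr hExp⟩
  · -- equal length: every decoration changes the length, so A finds nothing and B is False
    have hk0 : (((d.length : Int) - (p.length : Int)) == 0) = true := by simp; omega
    have hA1 : pvPrefixesA.any (fun pre => d == pre ++ p || p == pre ++ d) = false := by
      simp only [List.any_eq_false, Bool.or_eq_true, beq_iff_eq, not_or]
      intro q hq; have := hPne q hq
      constructor <;> intro h <;>
        (have := congrArg List.length h; simp [List.length_append] at this; omega)
    have hA2 : pvSuffixesA.any (fun suf => d == p ++ suf || p == d ++ suf) = false := by
      simp only [List.any_eq_false, Bool.or_eq_true, beq_iff_eq, not_or]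
      intro q hq; have := hSne q hq
      constructor <;> intro h <;>
        (have := congrArg List.length h; simp [List.length_append] at this; omega)
    simp [hA1, hA2, hk0]
  · -- d is the longer name: k > 0, lng = d, srt = p, n = d.length - p.length
    have hk0 : (((d.length : Int) - (p.length : Int)) == 0) = false := by simp; omega
    have hkpos : ((d.length : Int) - (p.length : Int) > 0) := by omega
    have hn : ((d.length : Int) - (p.length : Int)).natAbs = d.length - p.length := by omega
    simp only [hk0, Bool.false_eq_true, if_false, if_pos hkpos, hn]
    simp only [Bool.if_true_left, Bool.decide_eq_true, Bool.or_false]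
    rw [Bool.eq_iff_iff]
    simp only [Bool.or_eq_true, Bool.and_eq_true, List.any_eq_true, beq_iff_eq]
    have hmm : d.length - (d.length - p.length) = p.length := by omega
    rw [hmm]
    constructor
    · rintro (⟨q, hq, hq2 | hbad⟩ | ⟨q, hq, hq2 | hbad⟩)
      · exact Or.inl (by
          have := (pv_suffix_iff pvPrefixesA d p (by omega)).1 ⟨q, hq, hq2⟩
          exact ⟨this.1, by simp [this.2]⟩)
      · exfalso; have := congrArg List.length hbad; have := hPne q hq
        simp [List.length_append] at *; omega
      · exact Or.inr (by
          have := (pv_prefix_iff pvSuffixesA d p).1 ⟨q, hq, hq2⟩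
          exact ⟨this.1, by simp [this.2]⟩)
      · exfalso; have := congrArg List.length hbad; have := hSne q hq
        simp [List.length_append] at *; omega
    · rintro (⟨hmem, hdrop⟩ | ⟨hmem, htake⟩)
      · obtain ⟨q, hq, hExp⟩ := (pv_suffix_iff pvPrefixesA d p (by omega)).2
          ⟨hmem, by simpa using hdrop⟩
        exact Or.inl ⟨q, hq, Or.inl hExp⟩
      · obtain ⟨q, hq, hExp⟩ := (pv_prefix_iff pvSuffixesA d p).2 ⟨hmem, by simpa using htake⟩
        exact Or.inr ⟨q, hq, Or.inl hExp⟩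

-- ===== VERDICT (by name: the statement is the Claim_ definition above) =====
theorem is_common_prefix_suffix_swap_py_spec : Claim_equal_is_common_prefix_suffix_swap_py := by
  intro dep_name popular_name _
  unfold Spec_is_common_prefix_suffix_swap_py
  unfold is_common_prefix_suffix_swap_py is_common_prefix_suffix_swap_py_alt
  exact pv_core dep_name.toList popular_name.toList
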